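-- pv_equiv track=rewrite | github.com/pansicheng/TransX | src/model/Test.py | relation_batch
-- ===== SOURCE A (Python) =====
-- import math
--
-- def relation_batch(test_data, relation_num, batch_size):
--     _test_data = dict([(i, [])
--                        for i in range(relation_num)])
--     # 每个 batch 只能有一种关系
--     for triple in test_data:
--         _test_data[triple[2]].append(triple)
--     test_data = []
--     # 每个 batch 的大小要求不超过 batch_size
--     for _test_sub in list(_test_data.values()):
--         for i in range(math.ceil(len(_test_sub)/batch_size)):
--             test_data.append(_test_sub[i*batch_size:(i+1)*batch_size])
--     return test_data
-- ===== SOURCE B (Python) =====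
-- from itertools import groupby
--
-- def relation_batch(test_data, relation_num, batch_size):
--     batches = []
--     ordered = sorted(test_data, key=lambda triple: triple[2])
--     for _, group in groupby(ordered, key=lambda triple: triple[2]):
--         run = list(group)
--         for i in range(0, len(run), batch_size):
--             batches.append(run[i:i + batch_size])
--     return batches
-- ===== Notes on version B (the rewrite author's own statement) =====
-- stated objective: alternative
-- what changed: Instead of preallocating a dict keyed by range(relation_num) and appending each triple to its bucket, B stable-sorts a copy of test_data on triple[2], walks the runs of equal relation with itertools.groupby, and slices each run into batch_size chunks with range(0, len(run), batch_size).
-- outside the precondition, e.g. on relation_batch([], 0, 0): A returns [], B returns []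
import Mathlib
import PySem

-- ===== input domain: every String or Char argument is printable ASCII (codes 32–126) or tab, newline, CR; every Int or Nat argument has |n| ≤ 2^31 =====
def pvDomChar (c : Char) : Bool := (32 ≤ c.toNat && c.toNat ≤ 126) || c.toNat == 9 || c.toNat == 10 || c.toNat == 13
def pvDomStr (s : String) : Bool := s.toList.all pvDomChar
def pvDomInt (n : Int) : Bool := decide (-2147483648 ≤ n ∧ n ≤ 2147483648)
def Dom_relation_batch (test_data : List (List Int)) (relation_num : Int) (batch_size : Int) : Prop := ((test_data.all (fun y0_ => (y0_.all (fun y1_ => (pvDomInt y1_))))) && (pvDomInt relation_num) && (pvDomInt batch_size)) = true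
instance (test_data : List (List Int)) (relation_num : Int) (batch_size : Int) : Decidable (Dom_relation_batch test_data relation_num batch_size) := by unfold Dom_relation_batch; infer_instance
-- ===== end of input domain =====

-- B re-implements A (group triples by relation, then split each group into batches) by stable-sorting
-- a copy of test_data on triple[2] and slicing the runs of equal relation, instead of preallocating a
-- dict over range(relation_num); objective: alternative (same asymptotic cost up to the sort).

-- ===== PORT A =====
-- 'triple[2]' is ported as PySem.List.pyGetD triple 2 0: exact whenever 3 ≤ triple.length (Pre_);
-- 'math.ceil(len/batch_size)' is ported as the integer ceiling -((-len) // batch_size), exact for the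
-- list lengths and nonzero batch sizes admitted here.
def relation_batch (test_data : List (List Int)) (relation_num : Int) (batch_size : Int) : List (List (List Int)) :=
  let _test_data := PySem.Dict.ofList
    ((PySem.List.pyRange 0 relation_num 1).map (fun i => (i, ([] : List (List Int)))))
  let d := test_data.foldl
    (fun d triple => d.modify (PySem.List.pyGetD triple 2 0) [] (fun l => l ++ [triple])) _test_data
  d.values.foldl (fun out _test_sub =>
    (PySem.List.pyRange 0 (-(PySem.Int.floordiv (-((_test_sub.length : Int))) batch_size)) 1).foldl
      (fun out i => out ++ [PySem.List.slice _test_sub (some (i * batch_size)) (some ((i + 1) * batch_size))])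
      out) []

-- ===== PORT B =====
-- key(triple) = triple[2], ported as in A (exact whenever 3 ≤ triple.length, Pre_).
def pvKey (triple : List Int) : Int := PySem.List.pyGetD triple 2 0

-- itertools.groupby over the sorted copy: the maximal runs of equal key, in order.
def pvRuns : List (List Int) → List (List (List Int))
  | [] => []
  | [x] => [[x]]
  | x :: y :: xs =>
    match pvRuns (y :: xs) with
    | [] => [[x]]
    | r :: rs => if pvKey x == pvKey y then (x :: r) :: rs else [x] :: r :: rs

def relation_batch_alt (test_data : List (List Int)) (relation_num : Int) (batch_size : Int) : List (List (List Int)) :=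
  let ordered := PySem.List.sorted test_data pvKey false
  (pvRuns ordered).foldl (fun batches run =>
    (PySem.List.pyRange 0 (run.length : Int) batch_size).foldl
      (fun batches i => batches ++ [PySem.List.slice run (some i) (some (i + batch_size))])
      batches) []

-- ===== PRECONDITION & SPEC =====
-- Pre_ excludes exactly the inputs where the Python A raises: batch_size = 0 (ZeroDivisionError, except
-- for the degenerate empty-dict corner cited in the claim), a triple shorter than 3 (IndexError), or a
-- relation index outside range(relation_num) (KeyError on the preallocated dict).
def Pre_relation_batch (test_data : List (List Int)) (relation_num : Int) (batch_size : Int) : Prop :=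
  batch_size ≠ 0 ∧ ∀ t ∈ test_data, 3 ≤ t.length ∧
    0 ≤ PySem.List.pyGetD t 2 0 ∧ PySem.List.pyGetD t 2 0 < relation_num
instance (test_data : List (List Int)) (relation_num : Int) (batch_size : Int) : Decidable (Pre_relation_batch test_data relation_num batch_size) := by unfold Pre_relation_batch; infer_instance

def pvWitness_relation_batch : List (List Int) × Int × Int := ([[1, 2, 0], [3, 4, 1], [5, 6, 0]], 2, 2)

def Spec_relation_batch (test_data : List (List Int)) (relation_num : Int) (batch_size : Int) (out : List (List (List Int))) : Prop := out = relation_batch_alt test_data relation_num batch_size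
instance (test_data : List (List Int)) (relation_num : Int) (batch_size : Int) (out : List (List (List Int))) : Decidable (Spec_relation_batch test_data relation_num batch_size out) := by unfold Spec_relation_batch; infer_instance

-- ===== CLAIM (what is proved, stated in full; the proofs are below) =====
def Claim_equal_relation_batch : Prop := ∀ (test_data : List (List Int)) (relation_num : Int) (batch_size : Int), Dom_relation_batch test_data relation_num batch_size → Pre_relation_batch test_data relation_num batch_size → Spec_relation_batch test_data relation_num batch_size (relation_batch test_data relation_num batch_size)

-- ===== LEMMAS AND PROOFS =====

-- the bucket of relation r, in original order
def pvBucket (td : List (List Int)) (r : Int) : List (List Int) :=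
  td.filter (fun t => pvKey t == r)

-- A's batches of one group: ceil(n/bs) slices of width bs
def pvChunksA (bs : Int) (l : List (List Int)) : List (List (List Int)) :=
  (PySem.List.pyRange 0 (-(PySem.Int.floordiv (-((l.length : Int))) bs)) 1).map
    (fun i => PySem.List.slice l (some (i * bs)) (some ((i + 1) * bs)))

-- B's batches of one group: slices at 0, bs, 2*bs, …
def pvChunksB (bs : Int) (l : List (List Int)) : List (List (List Int)) :=
  (PySem.List.pyRange 0 (l.length : Int) bs).map
    (fun i => PySem.List.slice l (some i) (some (i + bs)))

lemma pvChunks_eq (bs : Int) (hbs : bs ≠ 0) (l : List (List Int)) :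
    pvChunksA bs l = pvChunksB bs l := by
  unfold pvChunksA pvChunksB
  set n : Int := (l.length : Int) with hn
  have hn0 : 0 ≤ n := by positivity
  rcases lt_or_gt_of_ne hbs with hneg | hpos
  · -- negative step: both ranges are empty
    have hC : -(PySem.Int.floordiv (-n) bs) ≤ 0 := by
      have : PySem.Int.floordiv (-n) bs = PySem.Int.floordiv n (-bs) := by
        have := PySem.Int.floordiv_neg_neg n (-bs)
        simpa using this
      rw [this, PySem.Int.floordiv_eq_ediv_of_pos (by omega)]
      have := Int.ediv_nonneg hn0 (by omega : (0:Int) ≤ -bs)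
      omega
    rw [PySem.List.pyRange_one_eq_nil hC]
    have : PySem.List.pyRange 0 n bs = [] := by
      simp [PySem.List.pyRange, hbs, not_lt.2 hneg.le, not_lt.2 hn0]
    rw [this]; rfl
  · -- positive step
    set q : Int := (n + bs - 1) / bs with hq
    have h1 := Int.ediv_add_emod (n + bs - 1) bs
    have h2 := Int.emod_nonneg (n + bs - 1) (by omega : bs ≠ 0)
    have h3 := Int.emod_lt_of_pos (n + bs - 1) hpos
    have hC : -(PySem.Int.floordiv (-n) bs) = q := by
      rw [PySem.Int.neg_floordiv_neg_eq_iff_of_pos hpos]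
      constructor <;> nlinarith
    rw [hC, PySem.List.pyRange_one, PySem.List.pyRange_of_pos 0 n hpos]
    have hcnt : q.toNat = if 0 < n then ((n - 0 + bs - 1) / bs).toNat else 0 := by
      split
      · simp [hq]
      · have hn' : n = 0 := by omega
        have : q ≤ 0 := by nlinarith
        omega
    rw [← hcnt, sub_zero, List.map_map, List.map_map]
    refine List.map_congr_left (fun k hk => ?_)
    simp only [Function.comp_apply]
    congr 2 <;> ring

lemma pvChunksB_nil (bs : Int) : pvChunksB bs [] = [] := by
  simp [pvChunksB, PySem.List.pyRange]

lemma pv_getD_foldl_insert_const {ν : Type} (v : ν) (ps : List (Int × ν)) (d : PySem.Dict Int ν)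
    (c : Int) (h : ∀ p ∈ ps, p.2 = v) (hd : d.getD c v = v) :
    (ps.foldl (fun a p => a.insert p.1 p.2) d).getD c v = v := by
  induction ps generalizing d with
  | nil => simpa using hd
  | cons p ps ih =>
    simp only [List.foldl_cons]
    refine ih _ (fun q hq => h q (by simp [hq])) ?_
    rw [PySem.Dict.getD_insert]
    split
    · exact (h p (by simp)).symm ▸ rfl
    · exact hd

lemma pv_flatMap_filter {q : Int → Bool} {f : Int → List (List (List Int))} (L : List Int)
    (h : ∀ r ∈ L, q r = false → f r = []) :
    L.flatMap f = (L.filter q).flatMap f := by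
  induction L with
  | nil => rfl
  | cons r L ih =>
    by_cases hq : q r = true
    · simp [List.filter_cons, hq, ih (fun x hx => h x (by simp [hx]))]
    · simp only [Bool.not_eq_true] at hq
      simp [List.filter_cons, hq, h r (by simp) hq, ih (fun x hx => h x (by simp [hx]))]

lemma pv_insertBy_pairwise (x : List Int) (ys : List (List Int))
    (h : ys.Pairwise (fun a b => pvKey a ≤ pvKey b)) :
    (PySem.List.insertBy (fun a b => decide (pvKey a < pvKey b)) x ys).Pairwise
      (fun a b => pvKey a ≤ pvKey b) := by
  induction ys with
  | nil => simp [PySem.List.insertBy]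
  | cons y ys ih =>
    rw [List.pairwise_cons] at h
    by_cases hb : pvKey x < pvKey y
    · rw [PySem.List.insertBy, if_pos (by simpa using hb)]
      refine List.pairwise_cons.2 ⟨?_, List.pairwise_cons.2 h⟩
      intro z hz
      rcases List.mem_cons.1 hz with rfl | hz
      · exact hb.le
      · exact hb.le.trans (h.1 z hz)
    · rw [PySem.List.insertBy, if_neg (by simpa using hb)]
      refine List.pairwise_cons.2 ⟨?_, ih h.2⟩
      intro z hz
      rcases (PySem.List.mem_insertBy _ _ _ _).1 hz with rfl | hz
      · omega
      · exact h.1 z hz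

lemma pv_filter_insertBy (r : Int) (x : List Int) (ys : List (List Int))
    (h : ys.Pairwise (fun a b => pvKey a ≤ pvKey b)) :
    (PySem.List.insertBy (fun a b => decide (pvKey a < pvKey b)) x ys).filter (fun t => pvKey t == r)
      = if pvKey x == r then ys.filter (fun t => pvKey t == r) ++ [x]
        else ys.filter (fun t => pvKey t == r) := by
  induction ys with
  | nil => by_cases hx : pvKey x == r <;> simp [PySem.List.insertBy, List.filter, hx]
  | cons y ys ih =>
    rw [List.pairwise_cons] at h
    by_cases hb : pvKey x < pvKey y
    · rw [PySem.List.insertBy, if_pos (by simpa using hb)]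
      by_cases hx : pvKey x = r
      · -- every element of y :: ys has key > r, so the filter there is empty
        have hemp : (y :: ys).filter (fun t => pvKey t == r) = [] := by
          rw [List.filter_eq_nil_iff]
          intro z hz
          rcases List.mem_cons.1 hz with rfl | hz
          · simp; omega
          · have := h.1 z hz; simp; omega
        simp [List.filter_cons, hx, hemp]
      · have hx' : (pvKey x == r) = false := by simpa using hx
        simp [List.filter_cons, hx']
    · rw [PySem.List.insertBy, if_neg (by simpa using hb)]
      rw [List.filter_cons, ih h.2]
      by_cases hx : pvKey x == r <;> by_cases hy : pvKey y == r <;>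
        simp [hx, hy, List.filter_cons]

lemma pv_filter_foldl (r : Int) (xs : List (List Int)) (acc : List (List Int))
    (h : acc.Pairwise (fun a b => pvKey a ≤ pvKey b)) :
    (xs.foldl (fun acc x => PySem.List.insertBy (fun a b => decide (pvKey a < pvKey b)) x acc) acc).filter
        (fun t => pvKey t == r)
      = acc.filter (fun t => pvKey t == r) ++ xs.filter (fun t => pvKey t == r) := by
  induction xs generalizing acc with
  | nil => simp
  | cons x xs ih =>
    simp only [List.foldl_cons]
    rw [ih _ (pv_insertBy_pairwise x acc h), pv_filter_insertBy r x acc h, List.filter_cons]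
    by_cases hx : pvKey x == r <;> simp [hx]

lemma pv_filter_sorted (td : List (List Int)) (r : Int) :
    (PySem.List.sorted td pvKey false).filter (fun t => pvKey t == r)
      = td.filter (fun t => pvKey t == r) := by
  rw [PySem.List.sorted_eq_foldl_insertBy]
  simpa using pv_filter_foldl r td [] (by simp)

lemma pvRuns_sorted (s : List (List Int)) (hs : s.Pairwise (fun a b => pvKey a ≤ pvKey b)) :
    ∃ K : List Int, K.Pairwise (· < ·) ∧ (∀ r, r ∈ K ↔ ∃ t ∈ s, pvKey t = r) ∧
      pvRuns s = K.map (fun r => s.filter (fun t => pvKey t == r)) := by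
  induction s with
  | nil => exact ⟨[], by simp, by simp, by simp [pvRuns]⟩
  | cons x s ih =>
    cases s with
    | nil => exact ⟨[pvKey x], by simp, by simp [eq_comm], by simp [pvRuns]⟩
    | cons y xs =>
      rw [List.pairwise_cons] at hs
      obtain ⟨K, hKlt, hKmem, hKeq⟩ := ih hs.2
      have hyK : pvKey y ∈ K := (hKmem _).2 ⟨y, by simp, rfl⟩
      obtain ⟨k0, K', rfl⟩ : ∃ k0 K', K = k0 :: K' := by
        cases K with
        | nil => simp at hyK
        | cons a b => exact ⟨a, b, rfl⟩
      -- the head key of K is pvKey y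
      have hk0 : k0 = pvKey y := by
        have h1 : k0 ∈ k0 :: K' := by simp
        obtain ⟨t, ht, hkt⟩ := (hKmem k0).1 h1
        have hge : pvKey y ≤ k0 := by
          rcases List.mem_cons.1 ht with rfl | ht
          · omega
          · have := (List.pairwise_cons.1 hs.2).1 t ht; omega
        rcases List.mem_cons.1 hyK with h | h
        · omega
        · have := (List.pairwise_cons.1 hKlt).1 _ h; omega
      subst hk0
      -- rewrite the recursive call
      have hrec : pvRuns (y :: xs)
          = ((y :: xs).filter (fun t => pvKey t == pvKey y)) :: K'.map (fun r => (y :: xs).filter (fun t => pvKey t == r)) := by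
        rw [hKeq, List.map_cons]
      by_cases hxy : pvKey x = pvKey y
      · refine ⟨pvKey y :: K', hKlt, ?_, ?_⟩
        · intro r
          rw [hKmem r]
          constructor
          · rintro ⟨t, ht, rfl⟩; exact ⟨t, by simp [List.mem_cons.1 ht], rfl⟩
          · rintro ⟨t, ht, rfl⟩
            rcases List.mem_cons.1 ht with rfl | ht
            · exact ⟨y, by simp, hxy.symm⟩
            · exact ⟨t, ht, rfl⟩
        · show pvRuns (x :: y :: xs) = _
          rw [pvRuns, hrec]
          dsimp only
          rw [if_pos (by simp [hxy] : (pvKey x == pvKey y) = true), List.map_cons]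
          congr 1
          · simp [List.filter_cons, hxy]
          · refine List.map_congr_left (fun r hr => ?_)
            have hlt : pvKey y < r := (List.pairwise_cons.1 hKlt).1 r hr
            have hxr : (pvKey x == r) = false := by simp only [beq_eq_false_iff_ne, ne_eq]; omega
            simp [List.filter_cons, hxr]
      · have hlt : pvKey x < pvKey y := lt_of_le_of_ne (hs.1 y (by simp)) hxy
        have hgt : ∀ t ∈ y :: xs, pvKey x < pvKey t := by
          intro t ht
          rcases List.mem_cons.1 ht with rfl | ht
          · exact hlt
          · have := (List.pairwise_cons.1 hs.2).1 t ht; omega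
        refine ⟨pvKey x :: pvKey y :: K', ?_, ?_, ?_⟩
        · refine List.pairwise_cons.2 ⟨?_, hKlt⟩
          intro r hr
          obtain ⟨t, ht, rfl⟩ := (hKmem r).1 hr
          exact hgt t ht
        · intro r
          constructor
          · intro hr
            rcases List.mem_cons.1 hr with rfl | hr
            · exact ⟨x, by simp, rfl⟩
            · obtain ⟨t, ht, rfl⟩ := (hKmem r).1 hr
              exact ⟨t, by simp [List.mem_cons.1 ht], rfl⟩
          · rintro ⟨t, ht, rfl⟩
            rcases List.mem_cons.1 ht with rfl | ht
            · simp
            · exact List.mem_cons.2 (Or.inr ((hKmem _).2 ⟨t, ht, rfl⟩))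
        · show pvRuns (x :: y :: xs) = _
          rw [pvRuns, hrec]
          dsimp only
          rw [if_neg (by simpa using hxy), List.map_cons, List.map_cons]
          have hemp : (y :: xs).filter (fun t => pvKey t == pvKey x) = [] := by
            rw [List.filter_eq_nil_iff]
            intro t ht
            have := hgt t ht
            simp only [beq_iff_eq]
            omega
          congr 1
          · simp [List.filter_cons, hemp]
          · congr 1
            · have hxf : (pvKey x == pvKey y) = false := by
                simp only [beq_eq_false_iff_ne, ne_eq]; omega
              simp [List.filter_cons, hxf]
            · refine List.map_congr_left (fun r hr => ?_)
              obtain ⟨t, ht, hrt⟩ := (hKmem r).1 (List.mem_cons_of_mem _ hr)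
              have := hgt t ht
              have hxr : (pvKey x == r) = false := by
                simp only [beq_eq_false_iff_ne, ne_eq]; omega
              simp [List.filter_cons, hxr]

-- ---- A's normal form ----

lemma pvA_getD (td : List (List Int)) (d : PySem.Dict Int (List (List Int))) (c : Int) :
    (td.foldl (fun d triple => d.modify (PySem.List.pyGetD triple 2 0) [] (fun l => l ++ [triple])) d).getD c []
      = d.getD c [] ++ pvBucket td c := by
  induction td generalizing d with
  | nil => simp [pvBucket]
  | cons t td ih =>
    simp only [List.foldl_cons]
    rw [ih, PySem.Dict.getD_modify]
    unfold pvBucket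
    rw [List.filter_cons]
    by_cases h : PySem.List.pyGetD t 2 0 = c
    · rw [if_pos h.symm, if_pos (by simpa [pvKey] using h), h, List.append_assoc]
      try rfl
    · rw [if_neg (fun hc => h hc.symm), if_neg (by simpa [pvKey] using h)]
      try rfl

lemma pvA_normal (td : List (List Int)) (rn bs : Int)
    (hk : ∀ t ∈ td, 0 ≤ PySem.List.pyGetD t 2 0 ∧ PySem.List.pyGetD t 2 0 < rn) :
    relation_batch td rn bs
      = (PySem.List.pyRange 0 rn 1).flatMap (fun r => pvChunksA bs (pvBucket td r)) := by
  unfold relation_batch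
  set pairs0 := (PySem.List.pyRange 0 rn 1).map (fun i => (i, ([] : List (List Int)))) with hpairs
  set d0 := PySem.Dict.ofList pairs0 with hd0
  set d := td.foldl (fun d triple => d.modify (PySem.List.pyGetD triple 2 0) [] (fun l => l ++ [triple])) d0 with hd
  have hkeys0 : d0.keys = PySem.List.pyRange 0 rn 1 := by
    have h1 : d0.keys = PySem.Set.update
        (PySem.Dict.empty : PySem.Dict Int (List (List Int))).keys (pairs0.map Prod.fst) := by
      simpa [hd0, PySem.Dict.ofList, PySem.Dict.update] using
        PySem.Dict.keys_foldl_insert_key pairs0 Prod.fst (fun _ p => p.2)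
          (PySem.Dict.empty : PySem.Dict Int (List (List Int)))
    rw [h1, PySem.Dict.keys_empty, PySem.Set.update_nil_left, hpairs, List.map_map]
    have h2 : (Prod.fst ∘ fun i => (i, ([] : List (List Int)))) = (fun i => i : Int → Int) := rfl
    rw [h2, List.map_id_fun']
    exact PySem.Set.ofList_eq_self_of_nodup _ (PySem.List.nodup_pyRange_one 0 rn)
  have hgetD0 : ∀ c, d0.getD c [] = [] := by
    intro c
    have h := pv_getD_foldl_insert_const ([] : List (List Int)) pairs0
      (PySem.Dict.empty : PySem.Dict Int (List (List Int))) c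
      (by intro p hp; rw [hpairs] at hp; obtain ⟨i, _, rfl⟩ := List.mem_map.1 hp; rfl)
      (PySem.Dict.getD_empty c [])
    simpa [hd0, PySem.Dict.ofList, PySem.Dict.update] using h
  have hkeysd : d.keys = PySem.List.pyRange 0 rn 1 := by
    have h1 : d.keys = PySem.Set.update d0.keys (td.map (fun t => PySem.List.pyGetD t 2 0)) := by
      simpa [hd] using
        PySem.Dict.keys_foldl_modify_key td (fun t => PySem.List.pyGetD t 2 0) []
          (fun _ triple => (fun l => l ++ [triple])) d0
    rw [h1, PySem.Set.update_eq_append_filter, hkeys0]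
    have h2 : (PySem.Set.ofList (td.map (fun t => PySem.List.pyGetD t 2 0))).filter
        (fun y => !(PySem.Set.contains (PySem.List.pyRange 0 rn 1) y)) = [] := by
      rw [List.filter_eq_nil_iff]
      intro y hy
      have hy' : y ∈ td.map (fun t => PySem.List.pyGetD t 2 0) := (PySem.Set.mem_ofList _ _).1 hy
      obtain ⟨t, ht, rfl⟩ := List.mem_map.1 hy'
      simpa using hk t ht
    rw [h2, List.append_nil]
  have hnodup : d.keys.Nodup := by rw [hkeysd]; exact PySem.List.nodup_pyRange_one 0 rn
  have hvals : d.values = (PySem.List.pyRange 0 rn 1).map (fun r => pvBucket td r) := by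
    rw [PySem.Dict.values_eq_map_keys d hnodup [], hkeysd]
    refine List.map_congr_left (fun r _ => ?_)
    rw [hd, pvA_getD, hgetD0, List.nil_append]
  have hinner : ∀ (out : List (List (List Int))) (sub : List (List Int)),
      (PySem.List.pyRange 0 (-(PySem.Int.floordiv (-((sub.length : Int))) bs)) 1).foldl
        (fun out i => out ++ [PySem.List.slice sub (some (i * bs)) (some ((i + 1) * bs))]) out
        = out ++ pvChunksA bs sub := by
    intro out sub
    exact PySem.List.foldl_append_singleton_eq_map _ _ _
  rw [PySem.List.foldl_congr_mem d.values _ (fun out sub => out ++ pvChunksA bs sub) []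
    (fun acc x _ => hinner acc x)]
  rw [PySem.List.foldl_append_eq_flatMap, List.nil_append, hvals]
  rw [List.flatMap_def, List.map_map, ← List.flatMap_def]
  rfl

-- ---- B's normal form ----

lemma pvB_normal (td : List (List Int)) (rn bs : Int) :
    ∃ K : List Int, K.Pairwise (· < ·) ∧ (∀ r, r ∈ K ↔ ∃ t ∈ td, pvKey t = r) ∧
      relation_batch_alt td rn bs = K.flatMap (fun r => pvChunksB bs (pvBucket td r)) := by
  obtain ⟨K, hKlt, hKmem, hKeq⟩ :=
    pvRuns_sorted (PySem.List.sorted td pvKey false) (PySem.List.sorted_pairwise td pvKey)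
  refine ⟨K, hKlt, ?_, ?_⟩
  · intro r
    rw [hKmem r]
    constructor
    · rintro ⟨t, ht, rfl⟩; exact ⟨t, (PySem.List.mem_sorted td pvKey false t).1 ht, rfl⟩
    · rintro ⟨t, ht, rfl⟩; exact ⟨t, (PySem.List.mem_sorted td pvKey false t).2 ht, rfl⟩
  · unfold relation_batch_alt
    have hinner : ∀ (batches : List (List (List Int))) (run : List (List Int)),
        (PySem.List.pyRange 0 ((run.length : Int)) bs).foldl
          (fun batches i => batches ++ [PySem.List.slice run (some i) (some (i + bs))]) batches
          = batches ++ pvChunksB bs run := by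
      intro batches run
      exact PySem.List.foldl_append_singleton_eq_map _ _ _
    rw [PySem.List.foldl_congr_mem _ _ (fun batches run => batches ++ pvChunksB bs run) []
      (fun acc x _ => hinner acc x)]
    rw [PySem.List.foldl_append_eq_flatMap, List.nil_append, hKeq]
    rw [List.flatMap_def, List.map_map, ← List.flatMap_def]
    rw [List.flatMap_def, List.flatMap_def]
    congr 1
    refine List.map_congr_left (fun r _ => ?_)
    show pvChunksB bs ((PySem.List.sorted td pvKey false).filter (fun t => pvKey t == r)) = _
    rw [pv_filter_sorted]
    rfl

-- ===== VERDICT (by name: the statement is the Claim_ definition above) =====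
theorem relation_batch_spec : Claim_equal_relation_batch := by
  intro td rn bs _ hpre
  obtain ⟨hbs, hall⟩ := hpre
  have hk : ∀ t ∈ td, 0 ≤ PySem.List.pyGetD t 2 0 ∧ PySem.List.pyGetD t 2 0 < rn := fun t ht =>
    ⟨(hall t ht).2.1, (hall t ht).2.2⟩
  show relation_batch td rn bs = relation_batch_alt td rn bs
  obtain ⟨K, hKlt, hKmem, hBeq⟩ := pvB_normal td rn bs
  rw [pvA_normal td rn bs hk, hBeq]
  have hfun : (fun r => pvChunksA bs (pvBucket td r)) = (fun r => pvChunksB bs (pvBucket td r)) :=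
    funext (fun r => pvChunks_eq bs hbs _)
  rw [hfun]
  rw [pv_flatMap_filter (q := fun r => td.any (fun t => pvKey t == r))
    (PySem.List.pyRange 0 rn 1) ?hq]
  case hq =>
    intro r _ hq
    have hnone : pvBucket td r = [] := by
      rw [pvBucket, List.filter_eq_nil_iff]
      intro t ht
      have := List.any_eq_false.1 hq t ht
      simpa using this
    rw [hnone, pvChunksB_nil]
  have hfil : (PySem.List.pyRange 0 rn 1).filter (fun r => td.any (fun t => pvKey t == r)) = K := by
    have hpw : ((PySem.List.pyRange 0 rn 1).filter
        (fun r => td.any (fun t => pvKey t == r))).Pairwise (· < ·) :=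
      (PySem.List.pairwise_lt_pyRange_one 0 rn).filter _
    have hnd1 : ((PySem.List.pyRange 0 rn 1).filter
        (fun r => td.any (fun t => pvKey t == r))).Nodup :=
      hpw.imp (fun h => ne_of_lt h)
    have hnd2 : K.Nodup := hKlt.imp (fun h => ne_of_lt h)
    have hiff : ∀ r, r ∈ (PySem.List.pyRange 0 rn 1).filter (fun r => td.any (fun t => pvKey t == r))
        ↔ r ∈ K := by
      intro r
      rw [List.mem_filter, hKmem r, PySem.List.mem_pyRange_one]
      constructor
      · rintro ⟨_, hq⟩
        obtain ⟨t, ht, hrt⟩ := List.any_eq_true.1 hq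
        exact ⟨t, ht, by simpa using hrt⟩
      · rintro ⟨t, ht, rfl⟩
        exact ⟨⟨(hk t ht).1, (hk t ht).2⟩, List.any_eq_true.2 ⟨t, ht, by simp⟩⟩
    have hperm : ((PySem.List.pyRange 0 rn 1).filter
        (fun r => td.any (fun t => pvKey t == r))).Perm K :=
      (List.perm_ext_iff_of_nodup hnd1 hnd2).2 hiff
    have h1 : PySem.List.sorted ((PySem.List.pyRange 0 rn 1).filter
        (fun r => td.any (fun t => pvKey t == r))) (fun x => x) = K :=
      PySem.List.sorted_eq_of_perm_of_pairwise_lt _ K (fun x => x) hperm.symm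
        (by simpa using hKlt)
    have h2 : PySem.List.sorted ((PySem.List.pyRange 0 rn 1).filter
        (fun r => td.any (fun t => pvKey t == r))) (fun x => x) = _ :=
      PySem.List.sorted_eq_self_of_pairwise _ (fun x => x)
        (by simpa using hpw.imp (fun h => le_of_lt h))
    rw [← h1, h2]
  rw [hfil]
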